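-- pv_equiv track=rewrite | github.com/longtngo/headroom | headroom/observable_memory/observer.py | detect_degenerate_repetition
-- ===== SOURCE A (Python) =====
-- def detect_degenerate_repetition(text: str) -> bool:
--     """Detect degenerate repetition in Observer/Reflector output.
--
--     Returns True if the text contains suspicious levels of repeated content,
--     which indicates an LLM repeat-penalty bug (e.g., looping).
--
--     Strategy: sample sequential 200-char windows; if >40% are duplicates → degenerate.
--     Also detects extremely long single lines (50k+ chars).
--
--     Args:
--         text: Model output to check.
--
--     Returns:
--         True if degenerate, False otherwise.
--     """
--     if not text or len(text) < 2000:
--         return False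
--
--     # Strategy 1: repeated 200-char windows
--     window_size = 200
--     step = max(1, len(text) // 50)  # ~50 samples
--     seen: dict[str, int] = {}
--     duplicate_windows = 0
--     total_windows = 0
--
--     for i in range(0, len(text) - window_size + 1, step):
--         window = text[i : i + window_size]
--         total_windows += 1
--         count = seen.get(window, 0) + 1
--         seen[window] = count
--         if count > 1:
--             duplicate_windows += 1
--
--     if total_windows > 5 and duplicate_windows / total_windows > 0.4:
--         return True
--
--     # Strategy 2: extremely long single line
--     for line in text.split("\n"):
--         if len(line) > 50_000:
--             return True
--
--     return False
-- ===== SOURCE B (Python) =====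
-- def detect_degenerate_repetition(text: str) -> bool:
--     """Sort-then-scan reformulation: sort the sampled windows so equal windows
--     become adjacent, then count duplicates as adjacent equal pairs (each extra
--     occurrence of a window contributes exactly one adjacent-equal pair)."""
--     if not text or len(text) < 2000:
--         return False
--
--     step = max(1, len(text) // 50)
--     windows = sorted(text[i : i + 200] for i in range(0, len(text) - 200 + 1, step))
--     total_windows = len(windows)
--     duplicate_windows = sum(1 for prev, cur in zip(windows, windows[1:]) if prev == cur)
--
--     if total_windows > 5 and duplicate_windows / total_windows > 0.4:
--         return True
--
--     return any(len(line) > 50_000 for line in text.split("\n"))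
-- ===== Notes on version B (the rewrite author's own statement) =====
-- stated objective: alternative
-- what changed: Strategy 1's hash-counting (dict counter with a running duplicate tally) is replaced by sort-then-scan: the sampled windows are sorted so equal windows become adjacent and duplicates are counted as adjacent equal pairs in one zip scan; Strategy 2's explicit line loop becomes an any() over the split lines.
import Mathlib
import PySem

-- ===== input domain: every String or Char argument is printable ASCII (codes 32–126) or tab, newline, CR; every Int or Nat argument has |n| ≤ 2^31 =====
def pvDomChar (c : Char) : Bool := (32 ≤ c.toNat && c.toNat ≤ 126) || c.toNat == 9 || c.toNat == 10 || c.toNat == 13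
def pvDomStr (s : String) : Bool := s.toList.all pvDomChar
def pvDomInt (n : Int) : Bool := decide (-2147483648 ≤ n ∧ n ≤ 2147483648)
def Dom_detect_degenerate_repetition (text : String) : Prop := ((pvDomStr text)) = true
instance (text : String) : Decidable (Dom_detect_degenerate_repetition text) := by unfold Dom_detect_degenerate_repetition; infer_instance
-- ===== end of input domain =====

-- B replaces A's dict-counter duplicate tally by sort-then-scan: the sampled windows are
-- sorted so equal windows become adjacent and duplicates are counted as adjacent equal
-- pairs; A's explicit long-line loop becomes an any(); objective: alternative.
-- In both ports the Python float test `duplicate/total > 0.4` is ported as the exact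
-- rational comparison `5*duplicate > 2*total`: total here is at most ~51 (≈50 samples), so
-- the correctly-rounded double quotient compares to the 0.4 literal exactly as the rationals do.

-- ===== PORT A =====
-- A's loop body on the sampled window (state = (seen dict, duplicate_windows, total_windows))
def pvABody (s : PySem.Dict (List Char) Int × Int × Int) (window : List Char) :
    PySem.Dict (List Char) Int × Int × Int :=
  let total := s.2.2 + 1
  let count := s.1.getD window 0 + 1
  let seen := s.1.insert window count
  let dup := if count > 1 then s.2.1 + 1 else s.2.1
  (seen, dup, total)

-- A's strategy-2 loop with early return
def pvALines : List (List Char) → Bool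
  | [] => false
  | l :: ls => if l.length > 50000 then true else pvALines ls

def detect_degenerate_repetition (text : String) : Bool :=
  let cs := text.toList
  if cs.length = 0 ∨ cs.length < 2000 then false
  else
    let window_size : Int := 200
    let step : Int := max 1 (PySem.Int.floordiv (cs.length : Int) 50)
    let st := (PySem.List.pyRange 0 ((cs.length : Int) - window_size + 1) step).foldl
      (fun s i => pvABody s (PySem.List.slice cs (some i) (some (i + window_size))))
      (PySem.Dict.empty, 0, 0)
    if st.2.2 > 5 ∧ 5 * st.2.1 > 2 * st.2.2 then true
    else pvALines (PySem.Chars.splitOn cs ['\n'])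

-- ===== PORT B =====
-- sum(1 for prev, cur in zip(windows, windows[1:]) if prev == cur)
def pvAdjDup (l : List (List Char)) : Int :=
  ((l.zip l.tail).countP (fun p => p.1 == p.2) : Int)

def detect_degenerate_repetition_alt (text : String) : Bool :=
  let cs := text.toList
  if cs.length = 0 ∨ cs.length < 2000 then false
  else
    let step : Int := max 1 (PySem.Int.floordiv (cs.length : Int) 50)
    let windows := PySem.List.sorted
      ((PySem.List.pyRange 0 ((cs.length : Int) - 200 + 1) step).map
        (fun i => PySem.List.slice cs (some i) (some (i + 200))))
      (fun x => x) false
    let total : Int := windows.length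
    let dup : Int := pvAdjDup windows
    if total > 5 ∧ 5 * dup > 2 * total then true
    else (PySem.Chars.splitOn cs ['\n']).any (fun line => line.length > 50000)

-- ===== PRECONDITION & SPEC =====
def Spec_detect_degenerate_repetition (text : String) (out : Bool) : Prop := out = detect_degenerate_repetition_alt text
instance (text : String) (out : Bool) : Decidable (Spec_detect_degenerate_repetition text out) := by unfold Spec_detect_degenerate_repetition; infer_instance

-- ===== CLAIM (what is proved, stated in full; the proofs are below) =====
def Claim_equal_detect_degenerate_repetition : Prop := ∀ (text : String), Dom_detect_degenerate_repetition text → Spec_detect_degenerate_repetition text (detect_degenerate_repetition text)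

-- ===== LEMMAS AND PROOFS =====

-- A's strategy-2 early-return loop is List.any
lemma pvALines_eq_any (ls : List (List Char)) :
    pvALines ls = ls.any (fun line => line.length > 50000) := by
  induction ls with
  | nil => rfl
  | cons l ls ih =>
    by_cases h : l.length > 50000 <;> simp [pvALines, ih, h]

-- loop invariant for A's counter fold over the window list: the total component counts
-- the windows, and dup + |distinct seen so far| advances by 1 per window
lemma pvALoop_inv (ws : List (List Char)) (seen : PySem.Dict (List Char) Int)
    (dup total : Int) (S : PySem.Set (List Char))
    (hS : ∀ w, 0 ≤ seen.getD w 0 ∧ (0 < seen.getD w 0 ↔ w ∈ S)) :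
    (ws.foldl pvABody (seen, dup, total)).2.2 = total + ws.length ∧
    (ws.foldl pvABody (seen, dup, total)).2.1 + ((PySem.Set.update S ws).length : Int)
      = dup + (S.length : Int) + ws.length := by
  induction ws generalizing seen dup total S with
  | nil => simp [PySem.Set.update]
  | cons w ws ih =>
    have hrec : PySem.Set.update S (w :: ws) = PySem.Set.update (PySem.Set.add S w) ws := rfl
    have hS' : ∀ w', 0 ≤ (seen.insert w (seen.getD w 0 + 1)).getD w' 0 ∧
        (0 < (seen.insert w (seen.getD w 0 + 1)).getD w' 0 ↔ w' ∈ PySem.Set.add S w) := by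
      intro w'
      rw [PySem.Dict.getD_insert]
      by_cases h : w' = w
      · subst h
        rw [if_pos rfl]
        have h0 := (hS w').1
        exact ⟨by omega, ⟨fun _ => (PySem.Set.mem_add _ _ _).mpr (Or.inr rfl), fun _ => by omega⟩⟩
      · rw [if_neg h]
        exact ⟨(hS w').1, by rw [PySem.Set.mem_add, or_iff_left h]; exact (hS w').2⟩
    rw [hrec]
    by_cases hw : w ∈ S
    · have hpos : seen.getD w 0 + 1 > 1 := by have := (hS w).2.mpr hw; omega
      have hadd : PySem.Set.add S w = S := by
        simp [PySem.Set.add, PySem.Set.contains, hw]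
      rw [hadd] at hS' ⊢
      have hih := ih (seen.insert w (seen.getD w 0 + 1)) (dup + 1) (total + 1)
        S hS'
      simp only [List.foldl_cons, pvABody, if_pos hpos]
      constructor
      · rw [hih.1]; simp only [List.length_cons]; push_cast; omega
      · rw [hih.2]; simp only [List.length_cons]; push_cast; omega
    · have hnpos : ¬ 0 < seen.getD w 0 := fun hc => hw ((hS w).2.mp hc)
      have hpos : ¬ (seen.getD w 0 + 1 > 1) := by omega
      have hadd : PySem.Set.add S w = S ++ [w] := by
        simp [PySem.Set.add, PySem.Set.contains, hw]
      have hih := ih (seen.insert w (seen.getD w 0 + 1)) dup (total + 1)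
        (PySem.Set.add S w) hS'
      simp only [List.foldl_cons, pvABody, if_neg hpos]
      constructor
      · rw [hih.1]; simp only [List.length_cons]; push_cast; omega
      · rw [hih.2, hadd]; simp only [List.length_cons, List.length_append,
          List.length_nil]; push_cast; omega

-- the fold from the empty dict, stated over the window list
lemma pvALoop_closed (ws : List (List Char)) :
    (ws.foldl pvABody (PySem.Dict.empty, 0, 0)).2.2 = (ws.length : Int) ∧
    (ws.foldl pvABody (PySem.Dict.empty, 0, 0)).2.1
      = (ws.length : Int) - ((PySem.Set.ofList ws).length : Int) := by
  have h := pvALoop_inv ws PySem.Dict.empty 0 0 PySem.Set.empty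
    (by intro w; simp [PySem.Dict.getD_empty, PySem.Set.empty])
  have hupd : PySem.Set.update PySem.Set.empty ws = PySem.Set.ofList ws := rfl
  rw [hupd] at h
  have h1 := h.1
  have h2 := h.2
  simp only [PySem.Set.empty, List.length_nil, Nat.cast_zero] at h1 h2
  exact ⟨by omega, by omega⟩

-- in a ≤-sorted list the adjacent-equal pairs count the non-first occurrences:
-- adjacent-equal count + number of distinct elements = length
lemma pvAdj_of_pairwise (l : List (List Char)) (hp : l.Pairwise (· ≤ ·)) :
    (l.zip l.tail).countP (fun p => p.1 == p.2) + l.toFinset.card = l.length := by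
  induction l with
  | nil => simp
  | cons x t ih =>
    match t, hp with
    | [], _ => simp
    | y :: t, hp =>
      have hxy : x ≤ y := (List.pairwise_cons.mp hp).1 y (by simp)
      have hxt : ∀ z ∈ t, x ≤ z := fun z hz => (List.pairwise_cons.mp hp).1 z (by simp [hz])
      have hp' : (y :: t).Pairwise (· ≤ ·) := (List.pairwise_cons.mp hp).2
      have hih := ih hp'
      simp only [List.tail_cons, List.zip_cons_cons, List.countP_cons, List.toFinset_cons] at *
      by_cases hxy' : x = y
      · have hmem : insert x (insert y t.toFinset) = insert y t.toFinset :=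
          Finset.insert_eq_self.mpr (by simp [hxy'])
        rw [hmem]
        simp only [hxy', beq_self_eq_true, if_true, List.length_cons] at *
        omega
      · have hmem : x ∉ (y :: t).toFinset := by
          simp only [List.mem_toFinset, List.mem_cons]
          rintro (h | h)
          · exact hxy' h
          · have hyx : y ≤ x := (List.pairwise_cons.mp hp').1 x h
            exact hxy' (le_antisymm hxy hyx)
        rw [Finset.card_insert_of_notMem (by simpa using hmem)]
        have : ((x == y) = false) := beq_false_of_ne hxy'
        simp only [this, Bool.false_eq_true, if_false, List.length_cons] at *
        omega

-- |set(ws)| is the number of distinct elements of ws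
lemma pvSetLen (ws : List (List Char)) :
    (PySem.Set.ofList ws).length = ws.toFinset.card := by
  have hfin : (PySem.Set.ofList ws).toFinset = ws.toFinset := by
    ext x; simp [PySem.Set.mem_ofList]
  rw [← hfin, List.toFinset_card_of_nodup (PySem.Set.nodup_ofList ws)]

-- B's sorted adjacent scan computes A's duplicate count
lemma pvAdjDup_sorted (ws : List (List Char)) :
    pvAdjDup (PySem.List.sorted ws (fun x => x) false)
      = (ws.length : Int) - ((PySem.Set.ofList ws).length : Int) := by
  have hperm : (PySem.List.sorted ws (fun x => x) false).Perm ws := PySem.List.sorted_perm ws _ _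
  have hp : (PySem.List.sorted ws (fun x => x) false).Pairwise (fun a b => a ≤ b) := by
    have hd : (fun (a b : List Char) => a.decidableLT b)
        = ((inferInstance : LinearOrder (List Char)).toDecidableLT : DecidableLT (List Char)) :=
      Subsingleton.elim _ _
    show List.Pairwise _ (@PySem.List.sorted (List Char) (List Char) List.instLT
      (fun a b => a.decidableLT b) ws (fun x => x) false)
    rw [hd]
    exact @PySem.List.sorted_pairwise (List Char) (List Char) inferInstance ws (fun x => x)
  have hadj := pvAdj_of_pairwise _ hp
  have hfin : (PySem.List.sorted ws (fun x => x) false).toFinset = ws.toFinset := by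
    ext x; simp [hperm.mem_iff]
  rw [hfin, hperm.length_eq] at hadj
  rw [pvSetLen] at *
  unfold pvAdjDup
  omega

-- ===== VERDICT (by name: the statement is the Claim_ definition above) =====
theorem detect_degenerate_repetition_spec : Claim_equal_detect_degenerate_repetition := by
  intro text _
  show detect_degenerate_repetition text = detect_degenerate_repetition_alt text
  unfold detect_degenerate_repetition detect_degenerate_repetition_alt
  by_cases hg : text.toList.length = 0 ∨ text.toList.length < 2000
  · simp only [if_pos hg]
  · simp only [if_neg hg]
    rw [pvALines_eq_any]
    rw [show (PySem.List.pyRange 0 ((text.toList.length : Int) - 200 + 1)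
          (max 1 (PySem.Int.floordiv (text.toList.length : Int) 50))).foldl
        (fun s i => pvABody s (PySem.List.slice text.toList (some i) (some (i + 200))))
        (PySem.Dict.empty, 0, 0)
      = ((PySem.List.pyRange 0 ((text.toList.length : Int) - 200 + 1)
          (max 1 (PySem.Int.floordiv (text.toList.length : Int) 50))).map
          (fun i => PySem.List.slice text.toList (some i) (some (i + 200)))).foldl
          pvABody (PySem.Dict.empty, 0, 0) from by rw [List.foldl_map]]
    rw [(pvALoop_closed _).1, (pvALoop_closed _).2, pvAdjDup_sorted,
      PySem.List.length_sorted]
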